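-- pv_equiv track=rewrite | github.com/Lug77/VIXAL | application/screener_v2.py | get_levels_cap
-- ===== SOURCE A (Python) =====
-- def get_levels_cap(min_cap, max_cap):
--     list_cap = ['Micro', 'Small', 'Middle', 'Large', 'Big']
--     result_array = ['1', '1', '1', '1', '1']
--     flag = False
--     flag_1 = True
--     for i in range(len(list_cap)):
--         if list_cap[i] == max_cap:
--             result_array[i] = list_cap[i]
--             flag_1 = False
--         if ((list_cap[i] == min_cap) or flag) and flag_1:
--             result_array[i] = list_cap[i]
--             flag = True
--     return result_array
-- ===== SOURCE B (Python) =====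
-- def get_levels_cap(min_cap, max_cap):
--     list_cap = ['Micro', 'Small', 'Middle', 'Large', 'Big']
--     imin = list_cap.index(min_cap) if min_cap in list_cap else None
--     imax = list_cap.index(max_cap) if max_cap in list_cap else None
--     result = ['1'] * 5
--     if imax is not None:
--         result[imax] = list_cap[imax]
--     if imin is not None and (imax is None or imin < imax):
--         for i in range(imin, 5 if imax is None else imax):
--             result[i] = list_cap[i]
--     return result
-- ===== Notes on version B (the rewrite author's own statement) =====
-- stated objective: simpler
-- what changed: Replaces A's single scan carrying two boolean flags by locating the indices of min_cap and max_cap first, marking the max index, and filling the [imin, imax) slice (or [imin, 5) when max is absent) only when imin < imax or max is absent.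
import Mathlib
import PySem

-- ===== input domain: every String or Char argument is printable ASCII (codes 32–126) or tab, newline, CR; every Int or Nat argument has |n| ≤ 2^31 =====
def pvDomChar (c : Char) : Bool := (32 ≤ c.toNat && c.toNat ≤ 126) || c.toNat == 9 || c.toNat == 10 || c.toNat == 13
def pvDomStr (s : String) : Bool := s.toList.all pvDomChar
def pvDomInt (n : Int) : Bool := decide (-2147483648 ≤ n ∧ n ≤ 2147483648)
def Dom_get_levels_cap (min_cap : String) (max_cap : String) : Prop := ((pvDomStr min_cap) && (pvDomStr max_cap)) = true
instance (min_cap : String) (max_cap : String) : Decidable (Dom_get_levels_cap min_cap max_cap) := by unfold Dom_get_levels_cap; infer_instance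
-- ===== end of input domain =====

-- B replaces A's single scan with two flags by locating min/max indices first and filling a slice; objective: simpler.

-- ===== PORT A =====
-- literal transliteration: for-loop over range(5) carrying (result_array, flag, flag_1)
def get_levels_cap (min_cap : String) (max_cap : String) : List String :=
  let list_cap := ["Micro", "Small", "Middle", "Large", "Big"]
  let st :=
    (PySem.List.pyRange 0 5 1).foldl
      (fun (st : List String × Bool × Bool) i =>
        let result_array := st.1
        let flag := st.2.1
        let flag_1 := st.2.2
        let (result_array, flag_1) :=
          if PySem.List.pyGetD list_cap i "" = max_cap then
            (PySem.List.pySetD result_array i (PySem.List.pyGetD list_cap i ""), false)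
          else (result_array, flag_1)
        let (result_array, flag) :=
          if (PySem.List.pyGetD list_cap i "" = min_cap ∨ flag = true) ∧ flag_1 = true then
            (PySem.List.pySetD result_array i (PySem.List.pyGetD list_cap i ""), true)
          else (result_array, flag)
        (result_array, flag, flag_1))
      (["1", "1", "1", "1", "1"], false, true)
  st.1

-- ===== PORT B =====
-- literal transliteration of Source B: locate indices, mark max, fill [imin, hi)
def get_levels_cap_alt (min_cap : String) (max_cap : String) : List String :=
  let list_cap := ["Micro", "Small", "Middle", "Large", "Big"]
  let imin := PySem.List.index? list_cap min_cap
  let imax := PySem.List.index? list_cap max_cap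
  let result := List.replicate 5 "1"
  let result :=
    match imax with
    | some j => PySem.List.pySetD result (j : Int) (PySem.List.pyGetD list_cap (j : Int) "")
    | none => result
  match imin with
  | some k =>
      if imax = none ∨ (∃ j, imax = some j ∧ k < j) then
        let hi : Int := match imax with | none => 5 | some j => (j : Int)
        (PySem.List.pyRange (k : Int) hi 1).foldl
          (fun result i => PySem.List.pySetD result i (PySem.List.pyGetD list_cap i "")) result
      else result
  | none => result

-- ===== PRECONDITION & SPEC =====
def Spec_get_levels_cap (min_cap : String) (max_cap : String) (out : List String) : Prop := out = get_levels_cap_alt min_cap max_cap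
instance (min_cap : String) (max_cap : String) (out : List String) : Decidable (Spec_get_levels_cap min_cap max_cap out) := by unfold Spec_get_levels_cap; infer_instance

-- ===== CLAIM (what is proved, stated in full; the proofs are below) =====
def Claim_equal_get_levels_cap : Prop := ∀ (min_cap : String) (max_cap : String), Dom_get_levels_cap min_cap max_cap → Spec_get_levels_cap min_cap max_cap (get_levels_cap min_cap max_cap)

-- ===== LEMMAS AND PROOFS =====
-- every string is one of the five cap names or none of them
theorem pv_cases (s : String) :
    "Micro" = s ∨ "Small" = s ∨ "Middle" = s ∨ "Large" = s ∨ "Big" = s ∨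
    ("Micro" ≠ s ∧ "Small" ≠ s ∧ "Middle" ≠ s ∧ "Large" ≠ s ∧ "Big" ≠ s) := by
  by_cases h1 : "Micro" = s
  · exact Or.inl h1
  by_cases h2 : "Small" = s
  · exact Or.inr (Or.inl h2)
  by_cases h3 : "Middle" = s
  · exact Or.inr (Or.inr (Or.inl h3))
  by_cases h4 : "Large" = s
  · exact Or.inr (Or.inr (Or.inr (Or.inl h4)))
  by_cases h5 : "Big" = s
  · exact Or.inr (Or.inr (Or.inr (Or.inr (Or.inl h5))))
  · exact Or.inr (Or.inr (Or.inr (Or.inr (Or.inr ⟨h1, h2, h3, h4, h5⟩))))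

-- ===== VERDICT (by name: the statement is the Claim_ definition above) =====
theorem get_levels_cap_spec : Claim_equal_get_levels_cap := by
  intro min_cap max_cap _
  unfold Spec_get_levels_cap
  have hr01 : PySem.List.pyRange 0 1 1 = [0] := by decide
  have hr02 : PySem.List.pyRange 0 2 1 = [0, 1] := by decide
  have hr03 : PySem.List.pyRange 0 3 1 = [0, 1, 2] := by decide
  have hr04 : PySem.List.pyRange 0 4 1 = [0, 1, 2, 3] := by decide
  have hr05 : PySem.List.pyRange 0 5 1 = [0, 1, 2, 3, 4] := by decide
  have hr12 : PySem.List.pyRange 1 2 1 = [1] := by decide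
  have hr13 : PySem.List.pyRange 1 3 1 = [1, 2] := by decide
  have hr14 : PySem.List.pyRange 1 4 1 = [1, 2, 3] := by decide
  have hr15 : PySem.List.pyRange 1 5 1 = [1, 2, 3, 4] := by decide
  have hr23 : PySem.List.pyRange 2 3 1 = [2] := by decide
  have hr24 : PySem.List.pyRange 2 4 1 = [2, 3] := by decide
  have hr25 : PySem.List.pyRange 2 5 1 = [2, 3, 4] := by decide
  have hr34 : PySem.List.pyRange 3 4 1 = [3] := by decide
  have hr35 : PySem.List.pyRange 3 5 1 = [3, 4] := by decide
  have hr45 : PySem.List.pyRange 4 5 1 = [4] := by decide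
  rcases pv_cases min_cap with h | h | h | h | h | ⟨h1, h2, h3, h4, h5⟩ <;>
    rcases pv_cases max_cap with g | g | g | g | g | ⟨g1, g2, g3, g4, g5⟩ <;>
    first
      | (subst h; subst g; decide)
      | (subst h;
         simp [get_levels_cap, get_levels_cap_alt, hr01, hr02, hr03, hr04, hr05, hr12, hr13, hr14, hr15, hr23, hr24, hr25, hr34, hr35, hr45, PySem.List.pyGetD,
               PySem.List.pyGet?, PySem.List.pyIdx?, PySem.List.pySetD, PySem.List.pySet?, PySem.List.index?,
               List.idxOf?, List.findIdx?, List.findIdx?.go, beq_iff_eq, g1, g2, g3, g4, g5])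
      | (subst g;
         simp [get_levels_cap, get_levels_cap_alt, hr01, hr02, hr03, hr04, hr05, hr12, hr13, hr14, hr15, hr23, hr24, hr25, hr34, hr35, hr45, PySem.List.pyGetD,
               PySem.List.pyGet?, PySem.List.pyIdx?, PySem.List.pySetD, PySem.List.pySet?, PySem.List.index?,
               List.idxOf?, List.findIdx?, List.findIdx?.go, beq_iff_eq, h1, h2, h3, h4, h5])
      | simp [get_levels_cap, get_levels_cap_alt, hr01, hr02, hr03, hr04, hr05, hr12, hr13, hr14, hr15, hr23, hr24, hr25, hr34, hr35, hr45, PySem.List.pyGetD,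
              PySem.List.pyGet?, PySem.List.pyIdx?, PySem.List.pySetD, PySem.List.pySet?, PySem.List.index?,
              List.idxOf?, List.findIdx?, List.findIdx?.go, beq_iff_eq, h1, h2, h3, h4, h5, g1, g2, g3, g4, g5]
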